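-- pv_equiv track=rewrite | github.com/Zhilin123/personal_attributes | model/generator_model.py | correct_one_tail
-- ===== SOURCE A (Python) =====
-- def remove_punct(tail):
--     return tail.replace('.','').replace('!','').replace('?','').replace(',','')
--
-- def correct_one_tail(tail, sentence):
--     sentence_split = sentence.split()
--     tail_split = tail.split()
--
--     for i in range(len(sentence_split)-len(tail_split)):
--         if sentence_split[i:i+len(tail_split)] == tail_split:
--             return tail
--
--     if ''.join(tail_split) in sentence_split:
--         return remove_punct(''.join(tail_split))
--
--     for i in range(len(sentence_split)-len(tail_split)):
--         if ' '.join(sentence_split[i:i+len(tail_split)]).startswith(' '.join(tail_split)):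
--             return remove_punct(' '.join(sentence_split[i:i+len(tail_split)]))
--
--     if len(tail_split) == 1:
--         for j in range(len(tail_split[0]), 1, -1):
--             for i in range(len(sentence_split)):
--                 if sentence_split[i].startswith(tail_split[0][:j]):
--                     return remove_punct(sentence_split[i])
--     else:
--         for i in range(len(sentence_split)):
--             if tail_split[0] == sentence_split[i]:
--                 return remove_punct(' '.join(sentence_split[i:i+len(tail_split)]))
--
--     return tail
-- ===== SOURCE B (Python) =====
-- def remove_punct(tail):
--     return ''.join(c for c in tail if c not in '.!?,')
--
-- def lcp_len(a, b):
--     n = 0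
--     while n < len(a) and n < len(b) and a[n] == b[n]:
--         n += 1
--     return n
--
-- def correct_one_tail(tail, sentence):
--     s = sentence.split()
--     t = tail.split()
--     if not t or not s:
--         return tail
--     m = len(t)
--     glued = ''.join(t)
--
--     # One fused pass over the sentence tokens.  A token window is kept verbatim only
--     # when at least one token follows it: sentence-final punctuation sticks to the
--     # last token, so a match reaching it goes through the punctuation-stripping
--     # fallbacks instead.
--     glued_hit = False      # the tail glued into one token occurs in the sentence
--     prefix_win = None      # first window extending the tail (tokenwise prefix test)
--     head_win = None        # first window starting with the tail's first token (m > 1)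
--     best_l, best_tok = 1, None   # token sharing the longest prefix with the tail (m == 1)
--     for i, w in enumerate(s):
--         inner = i + m < len(s)
--         if inner and s[i:i+m] == t:
--             return tail
--         if w == glued:
--             glued_hit = True
--         if inner and prefix_win is None and s[i:i+m-1] == t[:m-1] \
--                 and s[i+m-1].startswith(t[m-1]):
--             prefix_win = ' '.join(s[i:i+m])
--         if m == 1:
--             l = lcp_len(t[0], w)
--             if l > best_l:
--                 best_l, best_tok = l, w
--         elif head_win is None and w == t[0]:
--             head_win = ' '.join(s[i:i+m])
--
--     if glued_hit:
--         return remove_punct(glued)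
--     if prefix_win is not None:
--         return remove_punct(prefix_win)
--     if m == 1:
--         if best_tok is not None:
--             return remove_punct(best_tok)
--     elif head_win is not None:
--         return remove_punct(head_win)
--     return tail
-- ===== Notes on version B (the rewrite author's own statement) =====
-- stated objective: faster
-- what changed: B replaces A's four sequential scans (two index-and-slice window loops with per-window string joins, a membership test, and a descending double loop over prefix lengths) by a single fused pass over the sentence tokens that maintains four accumulators, using a tokenwise prefix test instead of joining each window into a string and an argmax-of-longest-common-prefix accumulator instead of A's nested prefix-length loop.
import Mathlib
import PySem

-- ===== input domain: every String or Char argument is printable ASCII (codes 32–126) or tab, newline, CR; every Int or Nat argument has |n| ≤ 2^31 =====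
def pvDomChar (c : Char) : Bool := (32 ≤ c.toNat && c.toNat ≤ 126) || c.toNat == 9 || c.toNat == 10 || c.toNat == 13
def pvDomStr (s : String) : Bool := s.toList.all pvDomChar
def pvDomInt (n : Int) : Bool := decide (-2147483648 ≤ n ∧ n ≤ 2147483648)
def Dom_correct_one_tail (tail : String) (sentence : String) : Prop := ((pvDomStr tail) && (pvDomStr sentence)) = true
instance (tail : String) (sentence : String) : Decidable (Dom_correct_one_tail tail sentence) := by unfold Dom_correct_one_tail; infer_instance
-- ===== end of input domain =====

-- B fuses A's four sequential scans into one pass over the sentence tokens, with tokenwise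
-- prefix tests instead of per-window string joins and an argmax-of-longest-common-prefix
-- accumulator instead of A's descending double loop (objective: faster).


-- ===== PORT A =====
def remove_punct (tail : String) : String :=
  PySem.Str.replace (PySem.Str.replace (PySem.Str.replace (PySem.Str.replace tail "." "") "!" "") "?" "") "," ""

def correct_one_tail (tail : String) (sentence : String) : String :=
  let sentence_split := PySem.Str.split₀ sentence
  let tail_split := PySem.Str.split₀ tail
  let n : Int := PySem.List.len sentence_split
  let m : Int := PySem.List.len tail_split
  match (PySem.List.pyRange 0 (n - m) 1).find?
      (fun i => PySem.List.slice sentence_split (some i) (some (i + m)) == tail_split) with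
  | some _ => tail
  | none =>
    if sentence_split.contains (PySem.Str.join "" tail_split) then
      remove_punct (PySem.Str.join "" tail_split)
    else
      match (PySem.List.pyRange 0 (n - m) 1).find?
          (fun i => PySem.Str.startswith
              (PySem.Str.join " " (PySem.List.slice sentence_split (some i) (some (i + m))))
              (PySem.Str.join " " tail_split)) with
      | some i => remove_punct (PySem.Str.join " " (PySem.List.slice sentence_split (some i) (some (i + m))))
      | none =>
        if m == 1 then
          let t0 := (PySem.List.pyGet? tail_split 0).getD ""
          match (PySem.List.pyRange (PySem.Str.len t0) 1 (-1)).findSome?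
              (fun j => sentence_split.find?
                (fun w => PySem.Str.startswith w (PySem.Str.slice t0 none (some j)))) with
          | some w => remove_punct w
          | none => tail
        else
          let t0 := (PySem.List.pyGet? tail_split 0).getD ""
          match (PySem.List.pyRange 0 n 1).find?
              (fun i => t0 == PySem.List.pyGetD sentence_split i "") with
          | some i => remove_punct (PySem.Str.join " " (PySem.List.slice sentence_split (some i) (some (i + m))))
          | none => tail

-- ===== PORT B =====
-- ''.join(c for c in tail if c not in '.!?,')  (single-char membership, ported as a char filter)
def remove_punct_alt (tail : String) : String :=
  String.ofList (tail.toList.filter (fun c => !(['.', '!', '?', ','].contains c)))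

def lcp_len : List Char → List Char → Nat
  | a :: as, b :: bs => if a = b then lcp_len as bs + 1 else 0
  | _, _ => 0

-- the fused 'for i, w in enumerate(s)' loop of Source B; early return on an exact inner window
-- is the Bool in the first component, the other components are the four accumulators.
-- s[i:i+m] on in-range Nat indices is (s.drop i).take m; s[i+m-1] is s.getD (i+m-1) (in range
-- whenever the guarding 'inner' conjunct holds, exactly as in Python's short-circuit 'and').
def scanFused (t s : List String) (glued t0 : String) (m : Nat) :
    List String → Nat → Bool → Option String → Option String → Nat × Option String →
    Bool × Bool × Option String × Option String × (Nat × Option String)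
  | [], _, g, pw, hw, best => (false, g, pw, hw, best)
  | w :: rest, i, g, pw, hw, best =>
    if decide (i + m < s.length) && ((s.drop i).take m == t) then (true, g, pw, hw, best)
    else
      let g' := g || (w == glued)
      let pw' := if decide (i + m < s.length) && pw.isNone
                    && ((s.drop i).take (m - 1) == t.take (m - 1))
                    && PySem.Str.startswith (s.getD (i + m - 1) "") (t.getD (m - 1) "")
                 then some (PySem.Str.join " " ((s.drop i).take m)) else pw
      if m == 1 then
        let l := lcp_len t0.toList w.toList
        scanFused t s glued t0 m rest (i + 1) g' pw' hw
          (if best.1 < l then (l, some w) else best)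
      else
        scanFused t s glued t0 m rest (i + 1) g' pw'
          (if hw.isNone && (w == t0) then some (PySem.Str.join " " ((s.drop i).take m)) else hw)
          best

def correct_one_tail_alt (tail : String) (sentence : String) : String :=
  let s := PySem.Str.split₀ sentence
  let t := PySem.Str.split₀ tail
  if t.isEmpty || s.isEmpty then tail else
  let m := t.length
  let glued := PySem.Str.join "" t
  let r := scanFused t s glued t.headI m s 0 false none none (1, none)
  if r.1 then tail
  else if r.2.1 then remove_punct_alt glued
  else match r.2.2.1 with
  | some w => remove_punct_alt w
  | none =>
    if m == 1 then
      match r.2.2.2.2.2 with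
      | some w => remove_punct_alt w
      | none => tail
    else
      match r.2.2.2.1 with
      | some w => remove_punct_alt w
      | none => tail

-- ===== PRECONDITION & SPEC =====
def Spec_correct_one_tail (tail : String) (sentence : String) (out : String) : Prop := out = correct_one_tail_alt tail sentence
instance (tail : String) (sentence : String) (out : String) : Decidable (Spec_correct_one_tail tail sentence out) := by unfold Spec_correct_one_tail; infer_instance

-- ===== CLAIM (what is proved, stated in full; the proofs are below) =====
def Claim_equal_correct_one_tail : Prop := ∀ (tail : String) (sentence : String), Dom_correct_one_tail tail sentence → Spec_correct_one_tail tail sentence (correct_one_tail tail sentence)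

-- ===== LEMMAS AND PROOFS =====

-- proof-layer reference scans (the four phases of the loop, taken separately)
def scanExact (t : List String) : List String → Bool
  | [] => false
  | w :: rest =>
    if (w :: rest).length < t.length then false
    else if (w :: rest).take t.length == t then true
    else scanExact t rest

def scanPrefix (t : List String) : List String → Option (List String)
  | [] => none
  | w :: rest =>
    if (w :: rest).length < t.length then none
    else if ((w :: rest).take (t.length - 1) == t.take (t.length - 1))
            && PySem.Str.startswith ((w :: rest).getD (t.length - 1) "") (t.getD (t.length - 1) "")
    then some ((w :: rest).take t.length)
    else scanPrefix t rest

def scanHead (t0 : String) (m : Nat) : List String → Option (List String)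
  | [] => none
  | w :: rest => if w == t0 then some ((w :: rest).take m) else scanHead t0 m rest

def oFirst : Option String → Option String → Option String
  | some x, _ => some x
  | none, b => b

theorem take_dropLast {α : Type} (l : List α) (k : Nat) (h : k ≤ l.length - 1) :
    l.dropLast.take k = l.take k := by
  rw [List.dropLast_eq_take, List.take_take, Nat.min_eq_left h]

theorem scanExact_short (t L : List String) (h : L.length < t.length) :
    scanExact t L = false := by
  cases L with
  | nil => rfl
  | cons w rest => simp only [scanExact, if_pos h]

theorem scanPrefix_short (t L : List String) (h : L.length < t.length) :
    scanPrefix t L = none := by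
  cases L with
  | nil => rfl
  | cons w rest => simp only [scanPrefix, if_pos h]



def goodTok (w : String) : Prop := w.toList ≠ [] ∧ ∀ c ∈ w.toList, PySem.Chars.isspace c = false

theorem split₀_go_good (cs cur : List Char) (acc : List (List Char))
    (hacc : ∀ w ∈ acc, w ≠ [] ∧ ∀ c ∈ w, PySem.Chars.isspace c = false)
    (hcur : ∀ c ∈ cur, PySem.Chars.isspace c = false) :
    ∀ w ∈ PySem.Chars.split₀.go cs cur acc, w ≠ [] ∧ ∀ c ∈ w, PySem.Chars.isspace c = false := by
  induction cs generalizing cur acc with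
  | nil =>
    intro w hw
    rw [PySem.Chars.split₀.go.eq_def] at hw
    dsimp only at hw
    by_cases hc : cur.isEmpty = true
    · simp only [hc, if_true, List.mem_reverse] at hw
      exact hacc w hw
    · rw [if_neg hc, List.mem_reverse] at hw
      rcases List.mem_cons.mp hw with h | h
      · subst h
        refine ⟨by simpa [List.isEmpty_iff] using hc, ?_⟩
        intro c hcm
        exact hcur c (List.mem_reverse.mp hcm)
      · exact hacc w h
  | cons c rest ih =>
    intro w hw
    rw [PySem.Chars.split₀.go.eq_def] at hw
    dsimp only at hw
    by_cases hsp : PySem.Chars.isspace c = true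
    · by_cases hc : cur.isEmpty = true
      · rw [if_pos hsp, if_pos hc] at hw
        exact ih [] acc hacc (by intro c h; simp at h) w hw
      · rw [if_pos hsp, if_neg hc] at hw
        refine ih [] (cur.reverse :: acc) ?_ (by intro c h; simp at h) w hw
        intro u hu
        rcases List.mem_cons.mp hu with h | h
        · subst h
          exact ⟨by simpa [List.isEmpty_iff] using hc,
                 fun d hd => hcur d (List.mem_reverse.mp hd)⟩
        · exact hacc u h
    · rw [if_neg hsp] at hw
      refine ih (c :: cur) acc hacc ?_ w hw
      intro d hd
      rcases List.mem_cons.mp hd with h | h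
      · subst h; simpa using hsp
      · exact hcur d h

theorem split₀_good (s : String) : ∀ w ∈ PySem.Str.split₀ s, goodTok w := by
  intro w hw
  unfold PySem.Str.split₀ at hw
  rcases List.mem_map.mp hw with ⟨l, hl, rfl⟩
  have := split₀_go_good s.toList [] [] (by intro u hu; simp at hu) (by intro c h; simp at h) l
    (by simpa [PySem.Chars.split₀] using hl)
  exact ⟨by simpa [String.toList_ofList] using this.1, by simpa [String.toList_ofList] using this.2⟩

theorem replace_go_single (c : Char) : ∀ (fuel : Nat) (l acc : List Char), l.length ≤ fuel →
    PySem.Chars.replace.go [c] [] fuel l acc = acc.reverse ++ l.filter (fun x => !(x == c)) := by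
  intro fuel
  induction fuel with
  | zero =>
    intro l acc h
    have : l = [] := List.length_eq_zero_iff.mp (Nat.le_zero.mp h)
    subst this
    rw [PySem.Chars.replace.go.eq_def]
    simp
  | succ fuel ih =>
    intro l acc h
    rw [PySem.Chars.replace.go.eq_def]
    match l with
    | [] => simp
    | d :: t =>
      have hpre : List.isPrefixOf [c] (d :: t) = (c == d) := by
        simp [List.isPrefixOf]
      by_cases hcd : c = d
      · subst hcd
        simp only [hpre, BEq.rfl, if_true, List.length_cons, List.length_nil,
          List.drop_succ_cons, List.drop_zero, List.reverse_nil, List.nil_append]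
        rw [ih t acc (by simpa using Nat.le_of_succ_le_succ h)]
        simp
      · have : (c == d) = false := by simpa using hcd
        simp only [hpre, this, Bool.false_eq_true, if_false]
        rw [ih t (d :: acc) (by simpa using Nat.le_of_succ_le_succ h)]
        have : (d == c) = false := by simpa using Ne.symm hcd
        simp [this]

theorem replace_single (s : List Char) (c : Char) :
    PySem.Chars.replace s [c] [] = s.filter (fun x => !(x == c)) := by
  rw [PySem.Chars.replace]
  simp only [List.isEmpty_cons, Bool.false_eq_true, if_false]
  simpa using replace_go_single c s.length s [] le_rfl

theorem remove_punct_eq (t : String) : remove_punct t = remove_punct_alt t := by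
  unfold remove_punct remove_punct_alt PySem.Str.replace
  simp only [String.toList_ofList]
  congr 1
  show PySem.Chars.replace (PySem.Chars.replace (PySem.Chars.replace
      (PySem.Chars.replace t.toList ['.'] []) ['!'] []) ['?'] []) [','] [] = _
  rw [replace_single, replace_single, replace_single, replace_single]
  simp only [List.filter_filter]
  apply List.filter_congr
  intro c _
  by_cases h1 : c = '.' <;> by_cases h2 : c = '!' <;> by_cases h3 : c = '?' <;> by_cases h4 : c = ','
    <;> simp [h1, h2, h3, h4]

theorem lcp_le (a w : List Char) : lcp_len a w ≤ a.length := by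
  induction a generalizing w with
  | nil => simp [lcp_len]
  | cons x xs ih =>
    cases w with
    | nil => simp [lcp_len]
    | cons y ys =>
      simp only [lcp_len]
      split
      · simpa using ih ys
      · simp

theorem take_isPrefixOf_iff_lcp (a w : List Char) (j : Nat) (hj : j ≤ a.length) :
    (a.take j).isPrefixOf w = decide (j ≤ lcp_len a w) := by
  induction j generalizing a w with
  | zero => simp [List.isPrefixOf]
  | succ j ih =>
    cases a with
    | nil => simp at hj
    | cons x xs =>
      cases w with
      | nil => simp [List.isPrefixOf, lcp_len]
      | cons y ys =>
        simp only [List.take_succ_cons, List.isPrefixOf, lcp_len]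
        by_cases hxy : x = y
        · subst hxy
          simp only [BEq.rfl, Bool.true_and, if_true]
          rw [ih xs ys (by simpa using hj)]
          simp [Nat.succ_le_succ_iff]
        · have h1 : (x == y) = false := by simpa using hxy
          simp [h1, hxy]

theorem prefix_token (t0 w0 u v : List Char)
    (ht : ∀ c ∈ t0, PySem.Chars.isspace c = false) (hw : ∀ c ∈ w0, PySem.Chars.isspace c = false) :
    ((t0 ++ ' ' :: u) <+: (w0 ++ ' ' :: v)) ↔ (t0 = w0 ∧ u <+: v) := by
  induction t0 generalizing w0 with
  | nil =>
    cases w0 with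
    | nil => simp [List.cons_prefix_cons]
    | cons b w0' =>
      have hb : b ≠ ' ' := by
        intro h
        have := hw b (by simp)
        rw [h] at this
        exact absurd this (by decide)
      have hb' : ¬ (' ' = b) := fun h => hb h.symm
      simp [List.cons_prefix_cons, hb']
  | cons a t0' ih =>
    have ha : a ≠ ' ' := by
      intro h
      have := ht a (by simp)
      rw [h] at this
      exact absurd this (by decide)
    cases w0 with
    | nil =>
      simp [List.cons_prefix_cons, ha]
    | cons b w0' =>
      simp only [List.cons_append, List.cons_prefix_cons]
      rw [ih w0' (fun c hc => ht c (List.mem_cons_of_mem _ hc)) (fun c hc => hw c (List.mem_cons_of_mem _ hc))]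
      constructor
      · rintro ⟨rfl, rfl, h⟩; exact ⟨rfl, h⟩
      · rintro ⟨he, h⟩
        obtain ⟨rfl, rfl⟩ : a = b ∧ t0' = w0' := by
          constructor <;> injection he
        exact ⟨rfl, rfl, h⟩

theorem cond3_eq (T W : List String) (hT : T ≠ []) (hlen : W.length = T.length)
    (hTg : ∀ u ∈ T, goodTok u) (hWg : ∀ u ∈ W, goodTok u) :
    PySem.Str.startswith (PySem.Str.join " " W) (PySem.Str.join " " T)
      = ((W.take (T.length - 1) == T.take (T.length - 1))
         && PySem.Str.startswith (W.getD (T.length - 1) "") (T.getD (T.length - 1) "")) := by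
  induction T generalizing W with
  | nil => exact absurd rfl hT
  | cons t0 T' ih =>
    cases W with
    | nil => simp at hlen
    | cons w0 W' =>
      cases T' with
      | nil =>
        have hW' : W' = [] := by
          simpa [List.length_eq_zero_iff] using hlen
        subst hW'
        simp only [List.length_cons, List.length_nil, Nat.zero_add, Nat.add_sub_cancel,
          List.take_zero, List.getD_cons_zero]
        unfold PySem.Str.startswith PySem.Str.join
        simp [PySem.Chars.join_singleton, String.toList_ofList]
      | cons t1 T'' =>
        cases W' with
        | nil => simp at hlen
        | cons w1 W'' =>
          have hsw : PySem.Str.startswith (PySem.Str.join " " (w0 :: w1 :: W''))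
              (PySem.Str.join " " (t0 :: t1 :: T''))
              = ((w0 == t0) && PySem.Str.startswith (PySem.Str.join " " (w1 :: W''))
                  (PySem.Str.join " " (t0 :: t1 :: T'').tail)) := by
            unfold PySem.Str.startswith PySem.Str.join
            simp only [String.toList_ofList, List.map_cons, PySem.Chars.join_cons_cons, List.tail_cons]
            rw [Bool.eq_iff_iff, PySem.Chars.startswith_iff]
            have hsp1 : (" " : String).toList = [' '] := rfl
            have harr : ∀ (x : List Char) (r : List Char), x ++ " ".toList ++ r = x ++ ' ' :: r := by
              intro x r
              rw [hsp1, List.append_assoc, List.singleton_append]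
            rw [harr, harr]
            rw [prefix_token _ _ _ _ ((hTg t0 (by simp)).2) ((hWg w0 (by simp)).2)]
            rw [Bool.and_eq_true, PySem.Chars.startswith_iff]
            constructor
            · rintro ⟨he, h⟩
              exact ⟨beq_iff_eq.mpr (by
                have : t0.toList = w0.toList := he
                exact (String.toList_inj.mp this).symm), h⟩
            · rintro ⟨he, h⟩
              have : w0 = t0 := beq_iff_eq.mp he
              subst this
              exact ⟨rfl, h⟩
          rw [hsw, List.tail_cons]
          rw [ih (w1 :: W'') (by simp) (by simpa using hlen)
              (fun u hu => hTg u (List.mem_cons_of_mem _ hu))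
              (fun u hu => hWg u (List.mem_cons_of_mem _ hu))]
          have hlen1 : (t0 :: t1 :: T'').length - 1 = T''.length + 1 := by simp
          have hlen2 : (t1 :: T'').length - 1 = T''.length := by simp
          rw [hlen1, hlen2]
          simp only [List.take_succ_cons, List.cons_beq_cons, List.getD_cons_succ]
          rw [Bool.and_assoc]

theorem find?_congr_mem {α : Type} (l : List α) (p q : α → Bool) (h : ∀ x ∈ l, p x = q x) :
    l.find? p = l.find? q := by
  induction l with
  | nil => rfl
  | cons x xs ih =>
    simp only [List.find?_cons]
    rw [h x (by simp)]
    cases q x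
    · exact ih (fun y hy => h y (by simp [hy]))
    · rfl

theorem scanExact_iff (t : List String) (ht : t ≠ []) (body : List String) :
    scanExact t body = true ↔ ∃ k, k + t.length ≤ body.length ∧ (body.drop k).take t.length = t := by
  have htl : 1 ≤ t.length := List.length_pos_iff.mpr ht
  induction body with
  | nil =>
    simp only [scanExact, List.length_nil]
    constructor
    · intro h; simp at h
    · rintro ⟨k, hk, -⟩; omega
  | cons w rest ih =>
    simp only [scanExact]
    by_cases hlen : (w :: rest).length < t.length
    · rw [if_pos hlen]
      constructor
      · intro h; simp at h
      · rintro ⟨k, hk, -⟩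
        have hk' : k + t.length ≤ (w :: rest).length := hk
        omega
    · rw [if_neg hlen]
      by_cases heq : (w :: rest).take t.length == t
      · rw [if_pos heq]
        constructor
        · intro _
          exact ⟨0, by omega, by simpa using (beq_iff_eq.mp heq)⟩
        · intro _; rfl
      · rw [if_neg heq]
        refine ih.trans ?_
        constructor
        · rintro ⟨k, hk, he⟩
          exact ⟨k + 1, by simpa [Nat.add_assoc, Nat.add_comm, Nat.add_left_comm] using
            Nat.add_le_add_right (Nat.add_le_add_right hk 0) 1 |>.trans (by simp [Nat.add_comm]), by simpa using he⟩
        · rintro ⟨k, hk, he⟩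
          cases k with
          | zero =>
            exfalso
            exact absurd (beq_iff_eq.mpr (by simpa using he)) (by simpa using heq)
          | succ k =>
            exact ⟨k, by simp at hk; omega, by simpa using he⟩

theorem scanPrefix_eq (t : List String) (ht : 1 ≤ t.length) : ∀ (body : List String),
    scanPrefix t body
      = ((List.range (body.length + 1 - t.length)).find? (fun k =>
            ((body.drop k).take (t.length - 1) == t.take (t.length - 1))
            && PySem.Str.startswith ((body.drop k).getD (t.length - 1) "") (t.getD (t.length - 1) ""))).map
          (fun k => (body.drop k).take t.length) := by
  intro body
  induction body with
  | nil =>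
    have : (0 : Nat) + 1 - t.length = 0 := by omega
    simp [scanPrefix, this]
  | cons w rest ih =>
    by_cases hlen : (w :: rest).length < t.length
    · have h0 : (w :: rest).length + 1 - t.length = 0 := by omega
      simp only [scanPrefix, if_pos hlen, h0]
      simp
    · have h0 : (w :: rest).length + 1 - t.length = ((w :: rest).length - t.length) + 1 := by omega
      simp only [scanPrefix, if_neg hlen, h0, List.range_succ_eq_map]
      rw [List.find?_cons]
      simp only [List.drop_zero]
      by_cases hcond : (((w :: rest).take (t.length - 1) == t.take (t.length - 1))
            && PySem.Str.startswith ((w :: rest).getD (t.length - 1) "") (t.getD (t.length - 1) "")) = true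
      · rw [if_pos hcond, hcond]
        simp
      · rw [if_neg hcond]
        rw [Bool.not_eq_true] at hcond
        rw [hcond]
        dsimp only
        rw [ih, List.find?_map, Option.map_map]
        have hlen2 : (w :: rest).length - t.length = rest.length + 1 - t.length := by
          simp
        rw [hlen2]
        simp only [Function.comp_def, List.drop_succ_cons]

theorem scanHead_eq (t0 : String) (m : Nat) : ∀ (s : List String),
    scanHead t0 m s
      = ((List.range s.length).find? (fun k => s.getD k "" == t0)).map
          (fun k => (s.drop k).take m) := by
  intro s
  induction s with
  | nil => simp [scanHead]
  | cons w rest ih =>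
    simp only [scanHead, List.length_cons, List.range_succ_eq_map]
    rw [List.find?_cons]
    by_cases hw : (w == t0) = true
    · rw [if_pos hw]
      have : ((w :: rest).getD 0 "" == t0) = true := by simpa using hw
      rw [this]
      simp
    · rw [if_neg hw]
      have : ((w :: rest).getD 0 "" == t0) = false := by
        simpa using (Bool.not_eq_true _).mp hw
      rw [this]
      dsimp only
      rw [ih, List.find?_map, Option.map_map]
      simp only [Function.comp_def, List.drop_succ_cons, Nat.succ_eq_add_one, List.getD_cons_succ]

theorem win_dropLast {α : Type} (s : List α) (k m : Nat) (h : k + m ≤ s.length - 1) :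
    ((s.dropLast.drop k).take m) = ((s.drop k).take m) := by
  rw [List.dropLast_eq_take, List.drop_take, List.take_take]
  have : m ≤ s.length - 1 - k := by omega
  rw [Nat.min_eq_left this]

def kmax (t0 : List Char) (ss : List String) : Nat :=
  ss.foldr (fun w acc => max (lcp_len t0 w.toList) acc) 0

theorem kmax_cons (t0 : List Char) (w : String) (ss : List String) :
    kmax t0 (w :: ss) = max (lcp_len t0 w.toList) (kmax t0 ss) := rfl

theorem kmax_ub (t0 : List Char) (ss : List String) : ∀ w ∈ ss, lcp_len t0 w.toList ≤ kmax t0 ss := by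
  induction ss with
  | nil => simp
  | cons x xs ih =>
    intro w hw
    rw [kmax_cons]
    rcases List.mem_cons.mp hw with h | h
    · subst h; exact Nat.le_max_left _ _
    · exact le_trans (ih w h) (Nat.le_max_right _ _)

theorem kmax_mem (t0 : List Char) (ss : List String) :
    kmax t0 ss = 0 ∨ ∃ w ∈ ss, lcp_len t0 w.toList = kmax t0 ss := by
  induction ss with
  | nil => left; rfl
  | cons x xs ih =>
    rw [kmax_cons]
    by_cases h : kmax t0 xs ≤ lcp_len t0 x.toList
    · right
      exact ⟨x, by simp, by omega⟩
    · rcases ih with h0 | ⟨w, hw, he⟩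
      · omega
      · right
        exact ⟨w, by simp [hw], by omega⟩

theorem kmax_le (t0 : List Char) (ss : List String) : kmax t0 ss ≤ t0.length := by
  rcases kmax_mem t0 ss with h | ⟨w, _, he⟩
  · omega
  · rw [← he]; exact lcp_le _ _

theorem fold_lcp (t0 : List Char) : ∀ (ss : List String) (b : Nat) (ow : Option String),
    ss.foldl (fun (acc : Nat × Option String) w =>
        let l := lcp_len t0 w.toList
        if acc.1 < l then (l, some w) else acc) (b, ow)
      = if b < kmax t0 ss
        then (kmax t0 ss, ss.find? (fun w => lcp_len t0 w.toList == kmax t0 ss))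
        else (b, ow) := by
  intro ss
  induction ss with
  | nil =>
    intro b ow
    simp [kmax]
  | cons w ss ih =>
    intro b ow
    rw [List.foldl_cons]
    dsimp only
    rw [kmax_cons, List.find?_cons]
    by_cases hbl : b < lcp_len t0 w.toList
    · rw [if_pos hbl, ih]
      by_cases hl : lcp_len t0 w.toList < kmax t0 ss
      · rw [if_pos hl]
        have hKK : max (lcp_len t0 w.toList) (kmax t0 ss) = kmax t0 ss := by omega
        rw [hKK]
        have hcond : (lcp_len t0 w.toList == kmax t0 ss) = false := by
          simp only [beq_eq_false_iff_ne, ne_eq]; omega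
        rw [hcond, if_pos (by omega : b < kmax t0 ss)]
      · rw [if_neg hl]
        have hKK : max (lcp_len t0 w.toList) (kmax t0 ss) = lcp_len t0 w.toList := by omega
        rw [hKK]
        have hcond : (lcp_len t0 w.toList == lcp_len t0 w.toList) = true := by simp
        rw [hcond, if_pos (by omega : b < lcp_len t0 w.toList)]
    · rw [if_neg hbl, ih]
      by_cases hbK : b < kmax t0 ss
      · rw [if_pos hbK]
        have hKK : max (lcp_len t0 w.toList) (kmax t0 ss) = kmax t0 ss := by omega
        rw [hKK, if_pos (by omega : b < kmax t0 ss)]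
        have hcond : (lcp_len t0 w.toList == kmax t0 ss) = false := by
          simp only [beq_eq_false_iff_ne, ne_eq]; omega
        rw [hcond]
      · rw [if_neg hbK]
        rw [if_neg (by omega : ¬ b < max (lcp_len t0 w.toList) (kmax t0 ss))]

theorem countdown (t0 : List Char) (ss : List String) (K : Nat)
    (hub : ∀ w ∈ ss, lcp_len t0 w.toList ≤ K)
    (hmem : K = 0 ∨ ∃ w ∈ ss, lcp_len t0 w.toList = K) :
    ∀ (j : Nat), K ≤ j ∨ K ≤ 1 → j ≤ t0.length →
    (PySem.List.pyRange (j : Int) 1 (-1)).findSome?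
        (fun jj => ss.find? (fun w => (t0.take jj.toNat).isPrefixOf w.toList))
      = if 2 ≤ K then ss.find? (fun w => lcp_len t0 w.toList == K) else none := by
  intro j
  induction j using Nat.strong_induction_on with
  | _ j ihj =>
    intro hKj hjt
    by_cases hj1 : j ≤ 1
    · rw [PySem.List.pyRange_neg_one_eq_nil (by exact_mod_cast hj1)]
      have hK1 : K ≤ 1 := by omega
      rw [if_neg (by omega)]
      rfl
    · have hj2 : 2 ≤ j := by omega
      rw [PySem.List.pyRange_neg_one_cons (by push_cast; omega : (1:Int) < j)]
      rw [List.findSome?_cons]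
      have htoNat : ((j : Int)).toNat = j := Int.toNat_natCast j
      have hcong : ss.find? (fun w => (t0.take ((j:Int)).toNat).isPrefixOf w.toList)
          = ss.find? (fun w => decide (j ≤ lcp_len t0 w.toList)) := by
        apply find?_congr_mem
        intro w _
        rw [htoNat, take_isPrefixOf_iff_lcp t0 w.toList j hjt]
      by_cases hKlt : K < j
      · have hnone : ss.find? (fun w => decide (j ≤ lcp_len t0 w.toList)) = none := by
          rw [List.find?_eq_none]
          intro w hw
          simp only [decide_eq_true_eq]
          have := hub w hw
          omega
        rw [hcong, hnone]
        have hcast : ((j : Int)) - 1 = ((j - 1 : Nat) : Int) := by omega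
        rw [hcast]
        exact ihj (j - 1) (by omega) (by omega) (by omega)
      · have hKj' : K = j := by omega
        subst hKj'
        rw [hcong]
        rcases hmem with h0 | ⟨w, hw, he⟩
        · omega
        · have hsome : (ss.find? (fun w => decide (K ≤ lcp_len t0 w.toList))).isSome := by
            rw [List.find?_isSome]
            exact ⟨w, hw, by simp [he]⟩
          obtain ⟨y, hy⟩ := Option.isSome_iff_exists.mp hsome
          rw [hy]
          rw [if_pos (by omega)]
          have : ss.find? (fun w => decide (K ≤ lcp_len t0 w.toList))
              = ss.find? (fun w => lcp_len t0 w.toList == K) := by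
            apply find?_congr_mem
            intro u hu
            have := hub u hu
            by_cases hle : K ≤ lcp_len t0 u.toList
            · have : lcp_len t0 u.toList = K := by omega
              simp [this]
            · have : (lcp_len t0 u.toList == K) = false := by
                simp only [beq_eq_false_iff_ne, ne_eq]; omega
              simp [hle, this]
          rw [← this, hy]

theorem findSome?_congr_mem {α β : Type} (l : List α) (f g : α → Option β)
    (h : ∀ x ∈ l, f x = g x) : l.findSome? f = l.findSome? g := by
  induction l with
  | nil => rfl
  | cons x xs ih =>
    rw [List.findSome?_cons, List.findSome?_cons, h x (by simp)]
    cases g x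
    · exact ih (fun y hy => h y (by simp [hy]))
    · rfl

theorem phase1_eq (ss ts : List String) (hts : ts ≠ []) :
    ((PySem.List.pyRange 0 ((ss.length : Int) - (ts.length : Int)) 1).find?
        (fun i => PySem.List.slice ss (some i) (some (i + (ts.length : Int))) == ts)).isSome
      = scanExact ts ss.dropLast := by
  have hm : 1 ≤ ts.length := List.length_pos_iff.mpr hts
  rw [Bool.eq_iff_iff, List.find?_isSome, scanExact_iff ts hts]
  constructor
  · rintro ⟨i, hi, hcond⟩
    rw [PySem.List.mem_pyRange_one] at hi
    obtain ⟨h0, hlt⟩ := hi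
    have hik : i = ((i.toNat : Nat) : Int) := by omega
    have hkm : i.toNat + ts.length ≤ ss.length - 1 := by omega
    refine ⟨i.toNat, by simpa [List.length_dropLast] using hkm, ?_⟩
    rw [win_dropLast ss i.toNat ts.length hkm]
    rw [hik] at hcond
    rw [PySem.List.slice_natCast_add] at hcond
    exact beq_iff_eq.mp hcond
  · rintro ⟨k, hk, he⟩
    rw [List.length_dropLast] at hk
    refine ⟨(k : Int), ?_, ?_⟩
    · rw [PySem.List.mem_pyRange_one]
      constructor
      · omega
      · omega
    · rw [PySem.List.slice_natCast_add]
      rw [← win_dropLast ss k ts.length hk]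
      exact beq_iff_eq.mpr he

theorem phase3_eq (ss ts : List String) (hts : ts ≠ [])
    (hssg : ∀ w ∈ ss, goodTok w) (htsg : ∀ u ∈ ts, goodTok u) :
    Option.map (fun i => PySem.List.slice ss (some i) (some (i + (ts.length : Int))))
      ((PySem.List.pyRange 0 ((ss.length : Int) - (ts.length : Int)) 1).find?
        (fun i => PySem.Str.startswith
            (PySem.Str.join " " (PySem.List.slice ss (some i) (some (i + (ts.length : Int)))))
            (PySem.Str.join " " ts)))
      = scanPrefix ts ss.dropLast := by
  have hm : 1 ≤ ts.length := List.length_pos_iff.mpr hts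
  rw [scanPrefix_eq ts hm]
  have hlen : ss.dropLast.length + 1 - ts.length = ss.length - ts.length := by
    rw [List.length_dropLast]; omega
  rw [hlen]
  rw [PySem.List.pyRange_one, Int.sub_zero, Int.toNat_sub, List.find?_map, Option.map_map]
  have hwin : ∀ k : Nat, k < ss.length - ts.length →
      PySem.List.slice ss (some ((k : Nat) : Int)) (some (((k : Nat) : Int) + (ts.length : Int)))
        = (ss.dropLast.drop k).take ts.length := by
    intro k hk
    rw [PySem.List.slice_natCast_add, win_dropLast ss k ts.length (by omega)]
  have hcond : (List.range (ss.length - ts.length)).find?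
        ((fun i => PySem.Str.startswith
            (PySem.Str.join " " (PySem.List.slice ss (some i) (some (i + (ts.length : Int)))))
            (PySem.Str.join " " ts)) ∘ (fun k : Nat => (0 : Int) + k))
      = (List.range (ss.length - ts.length)).find? (fun k =>
            ((ss.dropLast.drop k).take (ts.length - 1) == ts.take (ts.length - 1))
            && PySem.Str.startswith ((ss.dropLast.drop k).getD (ts.length - 1) "")
                 (ts.getD (ts.length - 1) "")) := by
    apply find?_congr_mem
    intro k hk
    rw [List.mem_range] at hk
    simp only [Function.comp_apply, Int.zero_add]
    rw [hwin k hk]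
    set W := (ss.dropLast.drop k).take ts.length with hW
    have hWlen : W.length = ts.length := by
      rw [hW, List.length_take, List.length_drop, List.length_dropLast]
      omega
    rw [cond3_eq ts W hts hWlen htsg (fun u hu => hssg u
      ((List.dropLast_sublist ss).subset (List.mem_of_mem_drop (List.mem_of_mem_take hu))))]
    congr 1
    · congr 1
      rw [hW, List.take_take, Nat.min_eq_left (by omega)]
    · congr 1
      rw [hW, List.getD_eq_getElem?_getD, List.getD_eq_getElem?_getD, List.getElem?_take,
        if_pos (by omega : ts.length - 1 < ts.length)]
  rw [hcond]
  cases hfind : (List.range (ss.length - ts.length)).find? (fun k =>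
            ((ss.dropLast.drop k).take (ts.length - 1) == ts.take (ts.length - 1))
            && PySem.Str.startswith ((ss.dropLast.drop k).getD (ts.length - 1) "")
                 (ts.getD (ts.length - 1) "")) with
  | none => simp
  | some k =>
    have hk : k < ss.length - ts.length := by
      have := List.mem_of_find?_eq_some hfind
      simpa [List.mem_range] using this
    simp only [Option.map_some, Function.comp_apply, Int.zero_add]
    rw [hwin k hk]

theorem phase4a_eq (t0 : String) (ss : List String) :
    (PySem.List.pyRange (PySem.Str.len t0) 1 (-1)).findSome?
        (fun j => ss.find? (fun w => PySem.Str.startswith w (PySem.Str.slice t0 none (some j))))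
      = (ss.foldl (fun (acc : Nat × Option String) w =>
          let l := lcp_len t0.toList w.toList
          if acc.1 < l then (l, some w) else acc) ((1 : Nat), (none : Option String))).2 := by
  rw [fold_lcp]
  have hcongr : ∀ j ∈ PySem.List.pyRange (PySem.Str.len t0) 1 (-1),
      ss.find? (fun w => PySem.Str.startswith w (PySem.Str.slice t0 none (some j)))
        = ss.find? (fun w => (t0.toList.take j.toNat).isPrefixOf w.toList) := by
    intro j hj
    rw [PySem.List.mem_pyRange_neg_one] at hj
    apply find?_congr_mem
    intro w _
    unfold PySem.Str.startswith PySem.Chars.startswith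
    congr 1
    rw [PySem.Str.toList_slice, PySem.Chars.slice_eq_listSlice,
      PySem.List.slice_to t0.toList (by omega : (0 : Int) ≤ j)]
  rw [findSome?_congr_mem _ _ _ hcongr]
  have hK := countdown t0.toList ss (kmax t0.toList ss) (kmax_ub _ _) (kmax_mem _ _)
    t0.toList.length (Or.inl (kmax_le _ _)) le_rfl
  have hlen : PySem.Str.len t0 = ((t0.toList.length : Nat) : Int) := rfl
  rw [hlen, hK]
  by_cases h2 : 2 ≤ kmax t0.toList ss
  · rw [if_pos h2, if_pos (by omega : 1 < kmax t0.toList ss)]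
  · rw [if_neg h2, if_neg (by omega : ¬ 1 < kmax t0.toList ss)]

theorem phase4b_eq (t0 : String) (m : Nat) (ss : List String) :
    Option.map (fun i => PySem.List.slice ss (some i) (some (i + (m : Int))))
      ((PySem.List.pyRange 0 (ss.length : Int) 1).find? (fun i => t0 == PySem.List.pyGetD ss i ""))
      = scanHead t0 m ss := by
  rw [scanHead_eq]
  have h0 : ((ss.length : Int) - (0 : Int)).toNat = ss.length := by omega
  rw [PySem.List.pyRange_one, h0, List.find?_map, Option.map_map]
  have hcond : (List.range ss.length).find?
        ((fun i => t0 == PySem.List.pyGetD ss i "") ∘ (fun k : Nat => (0 : Int) + k))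
      = (List.range ss.length).find? (fun k => ss.getD k "" == t0) := by
    apply find?_congr_mem
    intro k _
    simp only [Function.comp_apply, Int.zero_add, PySem.List.pyGetD_natCast]
    rw [Bool.eq_iff_iff, beq_iff_eq, beq_iff_eq]
    exact eq_comm
  rw [hcond]
  congr 1
  funext k
  simp only [Function.comp_apply, Int.zero_add]
  rw [PySem.List.slice_natCast_add]

theorem getD_dropLast_drop (s : List String) (i k : Nat) (hk : i + k < s.length - 1) :
    ((s.drop i).dropLast).getD k "" = s.getD (i + k) "" := by
  rw [List.getD_eq_getElem?_getD, List.getD_eq_getElem?_getD, List.getElem?_dropLast,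
    List.getElem?_drop, List.length_drop]
  rw [if_pos (by omega)]

theorem scanFused_inv (t s : List String) (glued t0 : String) (hm : 1 ≤ t.length) :
    ∀ (rest : List String) (i : Nat) (g : Bool) (pw hw : Option String) (best : Nat × Option String),
    rest = s.drop i →
    (scanFused t s glued t0 t.length rest i g pw hw best).1 = scanExact t ((s.drop i).dropLast)
    ∧ (scanExact t ((s.drop i).dropLast) = false →
       scanFused t s glued t0 t.length rest i g pw hw best
         = (false, g || (s.drop i).contains glued,
            oFirst pw ((scanPrefix t ((s.drop i).dropLast)).map (PySem.Str.join " ")),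
            (if t.length = 1 then hw
             else oFirst hw ((scanHead t0 t.length (s.drop i)).map (PySem.Str.join " "))),
            (if t.length = 1 then
               (s.drop i).foldl (fun (acc : Nat × Option String) w =>
                 let l := lcp_len t0.toList w.toList
                 if acc.1 < l then (l, some w) else acc) best
             else best))) := by
  intro rest
  induction rest with
  | nil =>
    intro i g pw hw best h
    rw [← h]
    refine ⟨rfl, fun _ => ?_⟩
    cases pw <;> cases hw <;>
      simp [scanFused, scanPrefix, scanHead, oFirst]
  | cons w rest' ih =>
    intro i g pw hw best h
    have hlen : s.length - i = rest'.length + 1 := by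
      have := congrArg List.length h
      simp only [List.length_cons, List.length_drop] at this
      omega
    have hi : i < s.length := by omega
    have hd1 : s.drop (i + 1) = rest' := by
      have ht : (s.drop i).tail = rest' := by rw [← h]; rfl
      rw [← ht, List.tail_drop]
    simp only [scanFused]
    rw [← h]
    have hbc : ∀ (a b : String), (a == b) = (b == a) := by
      intro a b
      by_cases hab : a = b
      · subst hab; rfl
      · simp [hab, Ne.symm hab]
    have hg : (w :: rest').contains glued = ((w == glued) || rest'.contains glued) := by
      rw [List.contains_cons, hbc glued w]
    have hE : scanExact t ((w :: rest').dropLast)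
        = (if (decide (i + t.length < s.length) && (List.take t.length (w :: rest') == t)) = true
           then true else scanExact t rest'.dropLast) := by
      by_cases hin : i + t.length < s.length
      · have hr0 : rest' ≠ [] := by
          intro e
          subst e
          simp only [List.length_nil] at hlen
          omega
        have hr0l : 1 ≤ rest'.length := List.length_pos_iff.mpr hr0
        rw [List.dropLast_cons_of_ne_nil hr0]
        simp only [scanExact]
        rw [if_neg (by simp only [List.length_cons, List.length_dropLast]; omega)]
        have htakeM : (w :: rest'.dropLast).take t.length = (w :: rest').take t.length := by
          rw [← List.dropLast_cons_of_ne_nil hr0]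
          exact take_dropLast _ _ (by simp only [List.length_cons]; omega)
        rw [htakeM]
        simp only [hin, decide_true, Bool.true_and]
      · rw [scanExact_short t _ (by simp only [List.length_dropLast, List.length_cons]; omega)]
        rw [if_neg (by simp [hin])]
        rw [scanExact_short t _ (by simp only [List.length_dropLast]; omega)]
    have hP : scanPrefix t ((w :: rest').dropLast)
        = (if (decide (i + t.length < s.length) && pw.isNone
                && (List.take (t.length - 1) (w :: rest') == List.take (t.length - 1) t)
                && PySem.Str.startswith (s.getD (i + t.length - 1) "") (t.getD (t.length - 1) "")) = true
           then some ((w :: rest').take t.length) else scanPrefix t rest'.dropLast) ∨ pw.isNone = false := by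
      by_cases hpwn : pw.isNone = true
      · left
        by_cases hin : i + t.length < s.length
        · have hr0 : rest' ≠ [] := by
            intro e
            subst e
            simp only [List.length_nil] at hlen
            omega
          have hr0l : 1 ≤ rest'.length := List.length_pos_iff.mpr hr0
          rw [List.dropLast_cons_of_ne_nil hr0]
          simp only [scanPrefix]
          rw [if_neg (by simp only [List.length_cons, List.length_dropLast]; omega)]
          have htakeM : (w :: rest'.dropLast).take t.length = (w :: rest').take t.length := by
            rw [← List.dropLast_cons_of_ne_nil hr0]
            exact take_dropLast _ _ (by simp only [List.length_cons]; omega)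
          have htakeM1 : (w :: rest'.dropLast).take (t.length - 1) = (w :: rest').take (t.length - 1) := by
            rw [← List.dropLast_cons_of_ne_nil hr0]
            exact take_dropLast _ _ (by simp only [List.length_cons]; omega)
          have hgetD : (w :: rest'.dropLast).getD (t.length - 1) "" = s.getD (i + t.length - 1) "" := by
            rw [← List.dropLast_cons_of_ne_nil hr0, h, getD_dropLast_drop s i (t.length - 1) (by omega)]
            congr 1
            omega
          rw [htakeM, htakeM1, hgetD]
          simp only [hin, decide_true, hpwn, Bool.true_and]
        · rw [scanPrefix_short t _ (by simp only [List.length_dropLast, List.length_cons]; omega)]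
          rw [if_neg (by simp [hin])]
          rw [scanPrefix_short t _ (by simp only [List.length_dropLast]; omega)]
      · right
        cases pw
        · simp at hpwn
        · rfl
    have hH : scanHead t0 t.length (w :: rest')
        = (if (w == t0) = true then some ((w :: rest').take t.length)
           else scanHead t0 t.length rest') := by
      simp only [scanHead]
    have e2 : ((g || (w == glued)) || rest'.contains glued) = (g || (w :: rest').contains glued) := by
      rw [hg, Bool.or_assoc]
    have e3 : oFirst (if (decide (i + t.length < s.length) && pw.isNone
                && (List.take (t.length - 1) (w :: rest') == List.take (t.length - 1) t)
                && PySem.Str.startswith (s.getD (i + t.length - 1) "") (t.getD (t.length - 1) "")) = true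
           then some (PySem.Str.join " " (List.take t.length (w :: rest'))) else pw) (Option.map (PySem.Str.join " ") (scanPrefix t rest'.dropLast))
        = oFirst pw (Option.map (PySem.Str.join " ") (scanPrefix t ((w :: rest').dropLast))) := by
      rcases hP with hP | hpwn
      · rw [hP]
        by_cases hc : (decide (i + t.length < s.length) && pw.isNone
              && (List.take (t.length - 1) (w :: rest') == List.take (t.length - 1) t)
              && PySem.Str.startswith (s.getD (i + t.length - 1) "") (t.getD (t.length - 1) "")) = true
        · rw [if_pos hc, if_pos hc]
          have hpw0 : pw = none := by
            have hcc := hc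
            simp only [Bool.and_eq_true] at hcc
            exact Option.isNone_iff_eq_none.mp hcc.1.1.2
          subst hpw0
          simp [oFirst]
        · rw [if_neg hc, if_neg hc]
      · have hpw : ∃ x, pw = some x := by
          cases pw
          · simp at hpwn
          · exact ⟨_, rfl⟩
        obtain ⟨x, hx⟩ := hpw
        subst hx
        rw [if_neg (by simp)]
        simp [oFirst]
    by_cases hex : (decide (i + t.length < s.length) && (List.take t.length (w :: rest') == t)) = true
    · rw [if_pos hex]
      refine ⟨by rw [hE, if_pos hex], ?_⟩
      intro hf
      rw [hE, if_pos hex] at hf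
      simp at hf
    · rw [if_neg hex]
      have hEr : scanExact t ((w :: rest').dropLast) = scanExact t rest'.dropLast := by
        rw [hE, if_neg hex]
      by_cases hm1 : t.length = 1
      · have hb1 : (t.length == 1) = true := by simp [hm1]
        rw [if_pos hb1]
        obtain ⟨h1, h2⟩ := ih (i + 1) (g || (w == glued))
          (if (decide (i + t.length < s.length) && pw.isNone
                && (List.take (t.length - 1) (w :: rest') == List.take (t.length - 1) t)
                && PySem.Str.startswith (s.getD (i + t.length - 1) "") (t.getD (t.length - 1) "")) = true
           then some (PySem.Str.join " " (List.take t.length (w :: rest'))) else pw)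
          hw
          (if best.1 < lcp_len t0.toList w.toList then (lcp_len t0.toList w.toList, some w) else best)
          hd1.symm
        rw [hd1] at h1 h2
        refine ⟨by rw [h1, hEr], ?_⟩
        intro hf
        have hf' : scanExact t rest'.dropLast = false := by rw [← hEr]; exact hf
        rw [h2 hf']
        have e5 : (List.foldl (fun (acc : Nat × Option String) w =>
              let l := lcp_len t0.toList w.toList
              if acc.1 < l then (l, some w) else acc)
            (if best.1 < lcp_len t0.toList w.toList then (lcp_len t0.toList w.toList, some w) else best) rest')
            = (List.foldl (fun (acc : Nat × Option String) w =>
              let l := lcp_len t0.toList w.toList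
              if acc.1 < l then (l, some w) else acc) best (w :: rest')) := by
          rw [List.foldl_cons]
        simp only [if_pos hm1]
        rw [e2, e3, e5]
      · have hb1 : (t.length == 1) = false := by simp [hm1]
        rw [if_neg (by simp [hb1])]
        obtain ⟨h1, h2⟩ := ih (i + 1) (g || (w == glued))
          (if (decide (i + t.length < s.length) && pw.isNone
                && (List.take (t.length - 1) (w :: rest') == List.take (t.length - 1) t)
                && PySem.Str.startswith (s.getD (i + t.length - 1) "") (t.getD (t.length - 1) "")) = true
           then some (PySem.Str.join " " (List.take t.length (w :: rest'))) else pw)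
          (if hw.isNone && (w == t0) then some (PySem.Str.join " " (List.take t.length (w :: rest'))) else hw)
          best
          hd1.symm
        rw [hd1] at h1 h2
        refine ⟨by rw [h1, hEr], ?_⟩
        intro hf
        have hf' : scanExact t rest'.dropLast = false := by rw [← hEr]; exact hf
        rw [h2 hf']
        have e4 : oFirst (if (hw.isNone && (w == t0)) = true
                then some (PySem.Str.join " " (List.take t.length (w :: rest'))) else hw)
              (Option.map (PySem.Str.join " ") (scanHead t0 t.length rest'))
            = oFirst hw (Option.map (PySem.Str.join " ") (scanHead t0 t.length (w :: rest'))) := by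
          rw [hH]
          cases hw with
          | some x => simp [oFirst]
          | none =>
            by_cases hwt : (w == t0) = true <;>
              simp [hwt, oFirst]
        simp only [if_neg hm1]
        rw [e2, e3, e4]

-- ===== VERDICT (by name: the statement is the Claim_ definition above) =====
theorem correct_one_tail_spec : Claim_equal_correct_one_tail := by
  intro tail sentence _
  unfold Spec_correct_one_tail
  show correct_one_tail tail sentence = correct_one_tail_alt tail sentence
  have hssg := split₀_good sentence
  have htsg := split₀_good tail
  simp only [correct_one_tail, correct_one_tail_alt, PySem.List.len]
  set ss := PySem.Str.split₀ sentence with hss_def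
  set ts := PySem.Str.split₀ tail with hts_def
  by_cases hts : ts = []
  · rw [hts]
    rw [if_pos (show (List.isEmpty ([] : List String) || ss.isEmpty) = true by simp)]
    by_cases hss : ss = []
    · rw [hss]
      simp only [List.length_nil, Nat.cast_zero, Int.sub_zero]
      rw [PySem.List.pyRange_one_eq_nil (le_rfl : (0:Int) ≤ 0)]
      simp only [List.find?_nil, List.contains_nil, Bool.false_eq_true, if_false]
      rw [show (List.findSome? (fun j => (none : Option String))
            (PySem.List.pyRange (PySem.Str.len ((PySem.List.pyGet? ([] : List String) 0).getD "")) 1 (-1))) = none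
        from List.findSome?_eq_none_iff.mpr (fun x _ => rfl)]
      split <;> rfl
    · obtain ⟨w, rest, hw⟩ := List.exists_cons_of_ne_nil hss
      rw [hw]
      simp only [List.length_nil, Nat.cast_zero, Int.sub_zero, Int.add_zero, List.length_cons]
      rw [PySem.List.pyRange_one_cons (by push_cast; omega)]
      rw [List.find?_cons]
      have hc : (PySem.List.slice (w :: rest) (some (0:Int)) (some (0:Int)) == ([] : List String)) = true := by
        rw [PySem.List.slice_zero_start, PySem.List.slice_to (w :: rest) le_rfl]
        simp
      rw [hc]
  · by_cases hss : ss = []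
    · rw [hss]
      rw [if_pos (show (ts.isEmpty || List.isEmpty ([] : List String)) = true by simp)]
      simp only [List.length_nil, Nat.cast_zero, Int.zero_sub]
      rw [PySem.List.pyRange_one_eq_nil (by omega : -((ts.length : Int)) ≤ 0)]
      rw [List.find?_nil, List.find?_nil]
      rw [if_neg (show ¬ ((List.contains ([] : List String) (PySem.Str.join "" ts)) = true) by simp)]
      rw [PySem.List.pyRange_one_eq_nil (le_rfl : (0:Int) ≤ 0), List.find?_nil]
      rw [show (List.findSome?
            (fun j => List.find? (fun w => PySem.Str.startswith w
              (PySem.Str.slice ((PySem.List.pyGet? ts 0).getD "") none (some j))) ([] : List String))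
            (PySem.List.pyRange (PySem.Str.len ((PySem.List.pyGet? ts 0).getD "")) 1 (-1))) = none
        from List.findSome?_eq_none_iff.mpr (fun x _ => rfl)]
      dsimp only
      split <;> rfl
    · rw [if_neg (show ¬ ((ts.isEmpty || ss.isEmpty) = true) by
        simp [List.isEmpty_iff, hts, hss])]
      have hm' : 1 ≤ ts.length := List.length_pos_iff.mpr hts
      obtain ⟨hinv1, hinv2⟩ := scanFused_inv ts ss (PySem.Str.join "" ts) ts.headI hm'
        ss 0 false none none (1, none) (List.drop_zero (l := ss)).symm
      simp only [List.drop_zero] at hinv1 hinv2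
      have h1 := phase1_eq ss ts hts
      cases hA1 : (PySem.List.pyRange 0 ((ss.length : Int) - (ts.length : Int)) 1).find?
          (fun i => PySem.List.slice ss (some i) (some (i + (ts.length : Int))) == ts) with
      | some i =>
        rw [hA1] at h1
        rw [if_pos (show (scanFused ts ss (PySem.Str.join "" ts) ts.headI ts.length
          ss 0 false none none (1, none)).1 = true from by rw [hinv1, ← h1]; rfl)]
      | none =>
        rw [hA1] at h1
        have hno : scanExact ts ss.dropLast = false := by rw [← h1]; simp
        have htup := hinv2 hno
        rw [if_neg (show ¬ ((scanFused ts ss (PySem.Str.join "" ts) ts.headI ts.length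
          ss 0 false none none (1, none)).1 = true) from by rw [hinv1, hno]; simp)]
        rw [htup]
        dsimp only
        simp only [Bool.false_or, oFirst]
        by_cases hglue : ss.contains (PySem.Str.join "" ts) = true
        · rw [if_pos hglue, if_pos hglue, remove_punct_eq]
        · rw [if_neg hglue, if_neg hglue]
          have h3 := phase3_eq ss ts hts hssg htsg
          cases hA3 : (PySem.List.pyRange 0 ((ss.length : Int) - (ts.length : Int)) 1).find?
              (fun i => PySem.Str.startswith
                (PySem.Str.join " " (PySem.List.slice ss (some i) (some (i + (ts.length : Int)))))
                (PySem.Str.join " " ts)) with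
          | some i =>
            rw [hA3] at h3
            simp only [Option.map_some] at h3
            rw [← h3]
            simp only [Option.map_some]
            rw [remove_punct_eq]
          | none =>
            rw [hA3] at h3
            simp only [Option.map_none] at h3
            rw [← h3]
            simp only [Option.map_none]
            have hcondeq : (((ts.length : Int)) == (1 : Int)) = (ts.length == 1) := by
              simp [beq_iff_eq]
            rw [hcondeq]
            by_cases hm1 : (ts.length == 1) = true
            · rw [if_pos hm1, if_pos hm1]
              rw [if_pos (show ts.length = 1 by simpa using hm1)]
              obtain ⟨x, hx⟩ := List.length_eq_one_iff.mp (by simpa using hm1)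
              rw [hx]
              simp only [PySem.List.pyGet?_zero_cons, Option.getD_some, List.headI_cons]
              rw [phase4a_eq x ss]
              cases (ss.foldl (fun (acc : Nat × Option String) w =>
                  let l := lcp_len x.toList w.toList
                  if acc.1 < l then (l, some w) else acc) ((1 : Nat), (none : Option String))).2 with
              | some w => exact remove_punct_eq w
              | none => rfl
            · rw [if_neg hm1, if_neg hm1]
              rw [if_neg (show ¬ ts.length = 1 by simpa using hm1)]
              have h4b := phase4b_eq ((PySem.List.pyGet? ts 0).getD "") ts.length ss
              have ht0 : (PySem.List.pyGet? ts 0).getD "" = ts.headI := by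
                obtain ⟨x, rest, hx⟩ := List.exists_cons_of_ne_nil hts
                rw [hx]
                simp
              cases hA4 : (PySem.List.pyRange 0 ((ss.length : Int)) 1).find?
                  (fun i => (PySem.List.pyGet? ts 0).getD "" == PySem.List.pyGetD ss i "") with
              | some i =>
                rw [hA4] at h4b
                simp only [Option.map_some] at h4b
                rw [ht0] at h4b
                rw [← h4b]
                simp only [Option.map_some]
                rw [remove_punct_eq]
              | none =>
                rw [hA4] at h4b
                simp only [Option.map_none] at h4b
                rw [ht0] at h4b
                rw [← h4b]
                simp only [Option.map_none]
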